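-- pv_equiv track=rewrite | github.com/miayuxin/leetcode | No.581_Shortest Unsorted Continuous Subarray.py | findRightSwapPoint
-- ===== SOURCE A (Python) =====
-- def findRightSwapPoint(nums):
--     #Phase 1
--     right = 0
--     for i in range(len(nums) - 2, -1, -1):
--         if (nums[i] > nums[i+1]):
--             right = (i+1)
--             break
--     #Phase 2
--     for i in range(right - 1, -1, -1):
--         while (right < len(nums) and nums[right] < nums[i]):
--             right += 1
--     return right
-- ===== SOURCE B (Python) =====
-- def findRightSwapPoint(nums):
--     # single forward pass: running prefix maximum; the answer is one past the
--     # last position whose value drops below the maximum of everything before it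
--     maxv = None
--     last = -1
--     for i, x in enumerate(nums):
--         if maxv is None or x >= maxv:
--             maxv = x
--         else:
--             last = i
--     return last + 1
-- ===== Notes on version B (the rewrite author's own statement) =====
-- stated objective: simpler
-- what changed: Replaced A's backward scan for the last adjacent inversion followed by a second backward loop with a nested while over a shared advancing pointer by one forward pass that keeps a running prefix maximum and records the last index whose value falls below it.
import Mathlib
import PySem

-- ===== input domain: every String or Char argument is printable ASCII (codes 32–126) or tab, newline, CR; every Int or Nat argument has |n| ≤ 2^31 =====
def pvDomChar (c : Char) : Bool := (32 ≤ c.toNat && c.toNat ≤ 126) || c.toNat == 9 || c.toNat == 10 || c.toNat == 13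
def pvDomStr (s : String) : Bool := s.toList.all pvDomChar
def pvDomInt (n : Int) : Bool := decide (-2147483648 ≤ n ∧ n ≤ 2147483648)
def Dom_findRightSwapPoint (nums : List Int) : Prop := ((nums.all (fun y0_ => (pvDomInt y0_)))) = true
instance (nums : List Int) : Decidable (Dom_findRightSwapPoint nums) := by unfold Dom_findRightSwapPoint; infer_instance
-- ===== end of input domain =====

-- B replaces A's two backward scans (last adjacent inversion, then a nested while over a
-- shared advancing pointer) by one forward pass keeping a running prefix maximum: simpler.


-- ===== PORT A =====
-- Phase 1: `for i in range(len(nums)-2, -1, -1): if nums[i] > nums[i+1]: right = i+1; break`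
-- rendered as the obvious countdown recursion; argument n+1 means the loop is at i = n.
def phase1Aux (nums : List Int) : Nat → Int
  | 0 => 0
  | n+1 =>
    if PySem.List.pyGetD nums (n : Int) 0 > PySem.List.pyGetD nums ((n : Int) + 1) 0
    then (n : Int) + 1
    else phase1Aux nums n

-- inner `while right < len(nums) and nums[right] < nums[i]: right += 1`,
-- fueled by nums.length (the pointer can advance at most that many times)
def innerAux (nums : List Int) (xi : Int) : Nat → Int → Int
  | 0, r => r
  | f+1, r =>
    if r < (nums.length : Int) ∧ PySem.List.pyGetD nums r 0 < xi
    then innerAux nums xi f (r + 1)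
    else r

-- Phase 2: `for i in range(right-1, -1, -1): <inner while>`; argument n+1 means i = n.
def phase2Aux (nums : List Int) : Nat → Int → Int
  | 0, r => r
  | n+1, r => phase2Aux nums n (innerAux nums (PySem.List.pyGetD nums (n : Int) 0) nums.length r)

def findRightSwapPoint (nums : List Int) : Int :=
  let right := phase1Aux nums (nums.length - 1)
  phase2Aux nums right.toNat right

-- ===== PORT B =====
-- forward pass of Source B: running prefix maximum `maxv`, `last` = last index below it
def altGo (l : List Int) (maxv : Option Int) (last : Int) (i : Int) : Int :=
  match l with
  | [] => last
  | x :: rest =>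
    match maxv with
    | none => altGo rest (some x) last (i + 1)
    | some m => if x ≥ m then altGo rest (some x) last (i + 1) else altGo rest (some m) i (i + 1)

def findRightSwapPoint_alt (nums : List Int) : Int :=
  altGo nums none (-1) 0 + 1

-- ===== PRECONDITION & SPEC =====
def Spec_findRightSwapPoint (nums : List Int) (out : Int) : Prop := out = findRightSwapPoint_alt nums
instance (nums : List Int) (out : Int) : Decidable (Spec_findRightSwapPoint nums out) := by unfold Spec_findRightSwapPoint; infer_instance

-- ===== CLAIM (what is proved, stated in full; the proofs are below) =====
def Claim_equal_findRightSwapPoint : Prop := ∀ (nums : List Int), Dom_findRightSwapPoint nums → Spec_findRightSwapPoint nums (findRightSwapPoint nums)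

-- ===== LEMMAS AND PROOFS =====

-- max-fold facts
lemma lmax_init : ∀ (l : List Int) (a : Int), a ≤ l.foldl max a
  | [], a => le_refl a
  | x :: l, a => le_trans (le_max_left a x) (lmax_init l (max a x))

lemma lmax_mem : ∀ (l : List Int) (a : Int) (p : Nat), p < l.length → l.getD p 0 ≤ l.foldl max a := by
  intro l
  induction l with
  | nil => intro a p h; simp at h
  | cons x l ih =>
      intro a p h
      match p with
      | 0 => simpa using le_trans (le_max_right a x) (lmax_init l (max a x))
      | p+1 =>
          rw [List.getD_cons_succ]
          exact ih (max a x) p (by simpa using h)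

lemma lmax_cases : ∀ (l : List Int) (a : Int),
    l.foldl max a = a ∨ ∃ p, p < l.length ∧ l.foldl max a = l.getD p 0 := by
  intro l
  induction l with
  | nil => intro a; exact Or.inl rfl
  | cons x l ih =>
      intro a
      rcases ih (max a x) with h | ⟨p, hp, he⟩
      · rcases le_total a x with hax | hxa
        · refine Or.inr ⟨0, by simp, ?_⟩
          rw [List.getD_cons_zero]
          simpa [max_eq_right hax] using h
        · exact Or.inl (by simpa [max_eq_left hxa] using h)
      · refine Or.inr ⟨p+1, by simpa using Nat.succ_lt_succ hp, ?_⟩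
        rw [List.getD_cons_succ]
        exact he

-- adjacent nondecreasing from K implies monotone on [K, n)
lemma mono_of_adj (nums : List Int) (K : Nat)
    (h : ∀ i, K ≤ i → i + 1 < nums.length → nums.getD i 0 ≤ nums.getD (i+1) 0) :
    ∀ a b, K ≤ a → a ≤ b → b < nums.length → nums.getD a 0 ≤ nums.getD b 0 := by
  intro a b
  induction b with
  | zero =>
      intro _ hab _
      have : a = 0 := by omega
      subst this; exact le_refl _
  | succ b ih =>
      intro hKa hab hbn
      rcases Nat.lt_or_ge a (b+1) with hlt | hge
      · exact le_trans (ih hKa (by omega) (by omega)) (h b (by omega) hbn)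
      · have : a = b + 1 := by omega
        subst this; exact le_refl _

-- Phase 1 characterisation: result 0 with the scanned prefix adjacent-sorted,
-- or (j:Int)+1 for the largest adjacent inversion j below m
lemma phase1_char (nums : List Int) : ∀ (m : Nat),
    (phase1Aux nums m = 0 ∧ ∀ i, i < m → nums.getD i 0 ≤ nums.getD (i+1) 0)
    ∨ (∃ j, j < m ∧ phase1Aux nums m = (j : Int) + 1 ∧ nums.getD (j+1) 0 < nums.getD j 0 ∧
        ∀ i, j < i → i < m → nums.getD i 0 ≤ nums.getD (i+1) 0) := by
  intro m
  induction m with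
  | zero => exact Or.inl ⟨rfl, by intro i hi; omega⟩
  | succ n ih =>
      have hc : PySem.List.pyGetD nums ((n : Int) + 1) 0 = nums.getD (n+1) 0 := by
        have h1 : ((n : Int) + 1) = ((n + 1 : Nat) : Int) := by push_cast; ring
        rw [h1, PySem.List.pyGetD_natCast]
      by_cases hinv : nums.getD (n+1) 0 < nums.getD n 0
      · refine Or.inr ⟨n, by omega, ?_, hinv, by intro i h1 h2; omega⟩
        simp only [phase1Aux, hc, PySem.List.pyGetD_natCast]
        rw [if_pos hinv]
      · have hle : nums.getD n 0 ≤ nums.getD (n+1) 0 := by omega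
        have hstep : phase1Aux nums (n+1) = phase1Aux nums n := by
          simp only [phase1Aux, hc, PySem.List.pyGetD_natCast]
          rw [if_neg hinv]
        rcases ih with ⟨h0, hs⟩ | ⟨j, hj, he, hjinv, hjs⟩
        · refine Or.inl ⟨by rw [hstep]; exact h0, ?_⟩
          intro i hi
          rcases Nat.lt_or_ge i n with h | h
          · exact hs i h
          · have : i = n := by omega
            subst this; exact hle
        · refine Or.inr ⟨j, by omega, by rw [hstep]; exact he, hjinv, ?_⟩
          intro i hji hin
          rcases Nat.lt_or_ge i n with h | h
          · exact hjs i hji h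
          · have : i = n := by omega
            subst this; exact hle

-- inner while characterisation: advances from r to the first s with nums.getD s 0 ≥ xi (or n)
lemma inner_char (nums : List Int) (xi : Int) : ∀ (f : Nat) (r : Nat),
    nums.length ≤ f + r → r ≤ nums.length →
    ∃ s : Nat, innerAux nums xi f (r : Int) = (s : Int) ∧ r ≤ s ∧ s ≤ nums.length ∧
      (∀ m, r ≤ m → m < s → nums.getD m 0 < xi) ∧
      (s = nums.length ∨ ¬ nums.getD s 0 < xi) := by
  intro f
  induction f with
  | zero =>
      intro r hf hr
      have : r = nums.length := by omega
      exact ⟨r, rfl, le_refl r, hr, by intro m h1 h2; omega, Or.inl this⟩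
  | succ f ih =>
      intro r hf hr
      by_cases hc : r < nums.length ∧ nums.getD r 0 < xi
      · have hstep : innerAux nums xi (f+1) (r : Int) = innerAux nums xi f ((r+1 : Nat) : Int) := by
          simp only [innerAux, PySem.List.pyGetD_natCast]
          rw [if_pos ⟨by exact_mod_cast hc.1, hc.2⟩]
          norm_cast
        obtain ⟨s, he, hrs, hsn, hskip, hstop⟩ := ih (r+1) (by omega) (by omega)
        refine ⟨s, by rw [hstep]; exact he, by omega, hsn, ?_, hstop⟩
        intro m hm hms
        rcases Nat.lt_or_ge m (r+1) with h | h
        · have : m = r := by omega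
          subst this; exact hc.2
        · exact hskip m h hms
      · refine ⟨r, ?_, le_refl r, hr, by intro m h1 h2; omega, ?_⟩
        · simp only [innerAux, PySem.List.pyGetD_natCast]
          rw [if_neg]
          intro h
          exact hc ⟨by exact_mod_cast h.1, h.2⟩
        · rcases Nat.lt_or_ge r nums.length with h | h
          · exact Or.inr (fun hx => hc ⟨h, hx⟩)
          · exact Or.inl (by omega)

-- Phase 2 characterisation (tail monotone from K): every skipped index is below some
-- nums.getD i 0 with i < c, and the stop index dominates all of them (or is n)
lemma phase2_char (nums : List Int) (K : Nat)
    (ST : ∀ a b, K ≤ a → a ≤ b → b < nums.length → nums.getD a 0 ≤ nums.getD b 0) :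
    ∀ (c : Nat) (r : Nat), K ≤ r → r ≤ nums.length →
    ∃ s : Nat, phase2Aux nums c (r : Int) = (s : Int) ∧ r ≤ s ∧ s ≤ nums.length ∧
      (∀ m, r ≤ m → m < s → ∃ i, i < c ∧ nums.getD m 0 < nums.getD i 0) ∧
      (s = nums.length ∨ ∀ i, i < c → nums.getD i 0 ≤ nums.getD s 0) := by
  intro c
  induction c with
  | zero =>
      intro r hK hr
      exact ⟨r, rfl, le_refl r, hr, by intro m h1 h2; omega, Or.inr (by intro i hi; omega)⟩
  | succ c ih =>
      intro r hK hr
      obtain ⟨r', he1, hrr', hr'n, hskip1, hstop1⟩ :=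
        inner_char nums (PySem.List.pyGetD nums (c : Int) 0) nums.length r (by omega) hr
      have hstep : phase2Aux nums (c+1) (r : Int) = phase2Aux nums c ((r' : Nat) : Int) := by
        simp only [phase2Aux]
        rw [he1]
      obtain ⟨s, he2, hr's, hsn, hskip2, hstop2⟩ := ih r' (by omega) hr'n
      have hdc : PySem.List.pyGetD nums (c : Int) 0 = nums.getD c 0 :=
        PySem.List.pyGetD_natCast ..
      refine ⟨s, by rw [hstep]; exact he2, by omega, hsn, ?_, ?_⟩
      · intro m hm hms
        rcases Nat.lt_or_ge m r' with h | h
        · refine ⟨c, by omega, ?_⟩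
          have := hskip1 m hm h
          rwa [hdc] at this
        · obtain ⟨i, hic, hlt⟩ := hskip2 m h hms
          exact ⟨i, by omega, hlt⟩
      · rcases hstop2 with h | h
        · exact Or.inl h
        · rcases Nat.lt_or_ge s nums.length with hsln | hsln
          · refine Or.inr ?_
            intro i hi
            rcases Nat.lt_or_ge i c with hic | hic
            · exact h i hic
            · have hieq : i = c := by omega
              subst hieq
              have h1 : nums.getD i 0 ≤ nums.getD r' 0 := by
                rcases hstop1 with h' | h'
                · omega
                · rw [hdc] at h'; omega
              exact le_trans h1 (ST r' s (by omega) hr's hsln)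
          · exact Or.inl (by omega)

-- B's forward pass: either no index ever drops below the running maximum and `last`
-- is returned, or the result is i + p for the LAST position p that does
lemma altGo_char : ∀ (l : List Int) (m : Int) (last : Int) (i : Int),
    (altGo l (some m) last i = last ∧
      ∀ p, p < l.length → ¬ (l.getD p 0 < (l.take p).foldl max m))
    ∨ (∃ p, p < l.length ∧ altGo l (some m) last i = i + (p : Int) ∧
        l.getD p 0 < (l.take p).foldl max m ∧
        ∀ q, p < q → q < l.length → ¬ (l.getD q 0 < (l.take q).foldl max m)) := by
  intro l
  induction l with
  | nil => intro m last i; exact Or.inl ⟨rfl, by intro p hp; simp at hp⟩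
  | cons x l ih =>
      intro m last i
      by_cases hx : x ≥ m
      · have hstep : altGo (x :: l) (some m) last i = altGo l (some x) last (i+1) := by
          simp [altGo, hx]
        have hfold : ∀ p, ((x :: l).take (p+1)).foldl max m = (l.take p).foldl max x := by
          intro p; simp [max_eq_right hx]
        rcases ih x last (i+1) with ⟨he, hs⟩ | ⟨p, hp, he, hlt, hs⟩
        · refine Or.inl ⟨by rw [hstep]; exact he, ?_⟩
          intro p hp
          match p with
          | 0 => simpa using hx
          | p+1 =>
              rw [hfold p, List.getD_cons_succ]
              exact hs p (by simpa using hp)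
        · refine Or.inr ⟨p+1, by simpa using Nat.succ_lt_succ hp, ?_, ?_, ?_⟩
          · rw [hstep, he]; push_cast; ring
          · rw [hfold p, List.getD_cons_succ]; exact hlt
          · intro q hq hql
            match q with
            | q+1 =>
                rw [hfold q, List.getD_cons_succ]
                exact hs q (by omega) (by simpa using hql)
      · have hxm : x < m := lt_of_not_ge hx
        have hstep : altGo (x :: l) (some m) last i = altGo l (some m) i (i+1) := by
          simp [altGo, hx]
        have hfold : ∀ p, ((x :: l).take (p+1)).foldl max m = (l.take p).foldl max m := by
          intro p; simp [max_eq_left (le_of_lt hxm)]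
        rcases ih m i (i+1) with ⟨he, hs⟩ | ⟨p, hp, he, hlt, hs⟩
        · refine Or.inr ⟨0, by simp, by rw [hstep, he]; simp, by simpa using hxm, ?_⟩
          intro q hq hql
          match q with
          | q+1 =>
              rw [hfold q, List.getD_cons_succ]
              exact hs q (by simpa using hql)
        · refine Or.inr ⟨p+1, by simpa using Nat.succ_lt_succ hp, ?_, ?_, ?_⟩
          · rw [hstep, he]; push_cast; ring
          · rw [hfold p, List.getD_cons_succ]; exact hlt
          · intro q hq hql
            match q with
            | q+1 =>
                rw [hfold q, List.getD_cons_succ]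
                exact hs q (by omega) (by simpa using hql)

-- the drop-below-running-max condition, translated to "some earlier element is larger"
lemma fold_cond_iff (y : Int) (rest : List Int) (p : Nat) (hp : p < rest.length) :
    (rest.getD p 0 < (rest.take p).foldl max y) ↔
    (∃ i, i < p + 1 ∧ (y :: rest).getD (p+1) 0 < (y :: rest).getD i 0) := by
  rw [List.getD_cons_succ]
  constructor
  · intro h
    rcases lmax_cases (rest.take p) y with hc | ⟨q, hq, hc⟩
    · refine ⟨0, by omega, ?_⟩
      rw [List.getD_cons_zero]
      rw [hc] at h
      exact h
    · have hqp : q < p := by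
        have := hq
        simp [List.length_take] at this
        omega
      have hget : (rest.take p).getD q 0 = rest.getD q 0 := by
        have h1 : q < (rest.take p).length := hq
        have h2 : q < rest.length := by omega
        rw [List.getD_eq_getElem _ _ h1, List.getD_eq_getElem _ _ h2]
        simp
      refine ⟨q+1, by omega, ?_⟩
      rw [List.getD_cons_succ]
      rw [hc, hget] at h
      exact h
  · rintro ⟨i, hi, hlt⟩
    match i with
    | 0 =>
        rw [List.getD_cons_zero] at hlt
        exact lt_of_lt_of_le hlt (lmax_init _ _)
    | i+1 =>
        rw [List.getD_cons_succ] at hlt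
        have hil : i < rest.length := by omega
        have hitake : i < (rest.take p).length := by
          simp [List.length_take]; omega
        have hget : (rest.take p).getD i 0 = rest.getD i 0 := by
          rw [List.getD_eq_getElem _ _ hitake, List.getD_eq_getElem _ _ hil]
          simp
        calc rest.getD p 0 < rest.getD i 0 := hlt
          _ = (rest.take p).getD i 0 := hget.symm
          _ ≤ (rest.take p).foldl max y := lmax_mem _ _ _ hitake

-- ===== VERDICT (by name: the statement is the Claim_ definition above) =====
theorem findRightSwapPoint_spec : Claim_equal_findRightSwapPoint := by
  unfold Claim_equal_findRightSwapPoint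
  intro nums _
  unfold Spec_findRightSwapPoint
  match nums with
  | [] => rfl
  | y :: rest =>
    have hn : (y :: rest).length = rest.length + 1 := by simp
    have haltdef : findRightSwapPoint_alt (y :: rest) = altGo rest (some y) (-1) 1 + 1 := by
      simp [findRightSwapPoint_alt, altGo]
    rcases phase1_char (y :: rest) ((y :: rest).length - 1) with ⟨h0, hsort⟩ | ⟨j, hj, he, hinv, hts⟩
    · -- fully non-decreasing: A returns 0, B's last stays -1
      have hA : findRightSwapPoint (y :: rest) = 0 := by
        have h0' : phase1Aux (y :: rest) rest.length = 0 := by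
          have hl : (y :: rest).length - 1 = rest.length := by simp
          rwa [hl] at h0
        simp [findRightSwapPoint, h0', phase2Aux]
      have hmono := mono_of_adj (y :: rest) 0 (by intro i _ h2; exact hsort i (by omega))
      have hB : altGo rest (some y) (-1) 1 = -1 := by
        rcases altGo_char rest y (-1) 1 with ⟨he', _⟩ | ⟨p, hp, _, hlt, _⟩
        · exact he'
        · exfalso
          obtain ⟨i, hi, hgt⟩ := (fold_cond_iff y rest p hp).mp hlt
          have := hmono i (p+1) (by omega) (by omega) (by omega)
          omega
      rw [hA, haltdef, hB]
      norm_num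
    · -- an inversion exists; K = j+1 is A's phase-1 result
      have hjn : j + 1 < (y :: rest).length := by omega
      have hST := mono_of_adj (y :: rest) (j+1) (by intro i h1 h2; exact hts i (by omega) (by omega))
      obtain ⟨s, he2, hKs, hsn, hskip, hstop⟩ :=
        phase2_char (y :: rest) (j+1) hST (j+1) (j+1) (le_refl _) (by omega)
      have hA : findRightSwapPoint (y :: rest) = (s : Int) := by
        have hv : phase1Aux (y :: rest) ((y :: rest).length - 1) = ((j + 1 : Nat) : Int) := by
          rw [he]; push_cast; ring
        simp only [findRightSwapPoint, hv, Int.toNat_natCast]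
        exact he2
      -- the pointer moved at least once: j+1 < s
      have hKlt : j + 1 < s := by
        rcases Nat.lt_or_ge (j+1) s with h | h
        · exact h
        · exfalso
          have hsK : s = j + 1 := by omega
          rcases hstop with h' | h'
          · omega
          · have := h' j (by omega)
            rw [hsK] at this
            omega
      -- index s-1 drops below the running prefix maximum
      have hC_s1 : rest.getD (s-2) 0 < (rest.take (s-2)).foldl max y := by
        rw [fold_cond_iff y rest (s-2) (by omega)]
        obtain ⟨i, hi, hgt⟩ := hskip (s-1) (by omega) (by omega)
        have hidx : s - 1 = (s - 2) + 1 := by omega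
        exact ⟨i, by omega, by rw [← hidx]; exact hgt⟩
      -- no index ≥ s drops below the running prefix maximum
      have hC_ge : ∀ p, p < rest.length → s ≤ p + 1 →
          ¬ (rest.getD p 0 < (rest.take p).foldl max y) := by
        intro p hp hsp hdrop
        obtain ⟨i, hi, hgt⟩ := (fold_cond_iff y rest p hp).mp hdrop
        have hle : (y :: rest).getD i 0 ≤ (y :: rest).getD (p+1) 0 := by
          rcases Nat.lt_or_ge i (j+1) with hic | hic
          · have hslt : s < (y :: rest).length := by omega
            have h1 : (y :: rest).getD i 0 ≤ (y :: rest).getD s 0 := by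
              rcases hstop with h' | h'
              · omega
              · exact h' i hic
            exact le_trans h1 (hST s (p+1) (by omega) (by omega) (by omega))
          · exact hST i (p+1) hic (by omega) (by omega)
        omega
      rcases altGo_char rest y (-1) 1 with ⟨_, hs'⟩ | ⟨p, hp, he', hlt, hmax'⟩
      · exact absurd hC_s1 (hs' (s-2) (by omega))
      · -- p = s - 2
        have hple : p + 1 ≤ s - 1 := by
          by_contra hcon
          exact hC_ge p hp (by omega) hlt
        have hpge : s - 2 ≤ p := by
          by_contra hcon
          exact absurd hC_s1 (hmax' (s-2) (by omega) (by omega))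
        have hpeq : p = s - 2 := by omega
        rw [hA, haltdef, he', hpeq]
        have : ((s - 2 : Nat) : Int) = (s : Int) - 2 := by omega
        rw [this]
        ring
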